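-- pv_equiv track=rewrite | github.com/minjung1004/CS-2520 | Project/lab1.py | replace_punction
-- ===== SOURCE A (Python) =====
-- def replace_punction(user_text, exclamation_count = 0, semicolon_count = 0):
--     fixed_text=''
--     for character in user_text:
--         if character == '!':
--             fixed_text += '.'
--             exclamation_count += 1
--         elif character == ';':
--             fixed_text += ','
--             semicolon_count += 1
--         else:
--             fixed_text += character
--     return (fixed_text,exclamation_count,semicolon_count)
-- ===== SOURCE B (Python) =====
-- def replace_punction(user_text, exclamation_count = 0, semicolon_count = 0):
--     exclamation_count += user_text.count('!')
--     semicolon_count += user_text.count(';')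
--     fixed_text = user_text.replace('!', '.').replace(';', ',')
--     return (fixed_text, exclamation_count, semicolon_count)
-- ===== Notes on version B (the rewrite author's own statement) =====
-- stated objective: idiomatic
-- what changed: Replaces the fused per-character loop with two str.count scans for the counters and chained str.replace calls for the text ('!' and ';' are disjoint so the replacements cannot cascade).
import Mathlib
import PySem

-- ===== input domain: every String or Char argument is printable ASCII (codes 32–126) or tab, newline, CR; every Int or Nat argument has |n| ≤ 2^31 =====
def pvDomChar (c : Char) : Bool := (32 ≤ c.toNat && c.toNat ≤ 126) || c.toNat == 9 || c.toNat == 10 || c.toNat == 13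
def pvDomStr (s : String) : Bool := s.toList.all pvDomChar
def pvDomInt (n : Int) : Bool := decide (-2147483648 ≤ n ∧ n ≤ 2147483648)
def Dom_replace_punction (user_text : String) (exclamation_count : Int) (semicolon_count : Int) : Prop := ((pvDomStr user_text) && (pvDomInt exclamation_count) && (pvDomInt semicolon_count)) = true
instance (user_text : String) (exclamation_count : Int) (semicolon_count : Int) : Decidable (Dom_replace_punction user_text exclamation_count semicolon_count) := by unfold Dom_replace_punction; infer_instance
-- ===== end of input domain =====

-- B replaces A's fused per-character loop by two str.count scans and two chained str.replace passes (idiomatic; '!' and ';' are disjoint so the replacements cannot cascade).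

-- ===== PORT A =====
-- loop state = (fixed_text as its list of characters, exclamation_count, semicolon_count)
def replace_punction (user_text : String) (exclamation_count : Int) (semicolon_count : Int) : String × Int × Int :=
  let r := user_text.toList.foldl
    (fun (st : List Char × Int × Int) character =>
      if character == '!' then (st.1 ++ ['.'], st.2.1 + 1, st.2.2)
      else if character == ';' then (st.1 ++ [','], st.2.1, st.2.2 + 1)
      else (st.1 ++ [character], st.2.1, st.2.2))
    ([], exclamation_count, semicolon_count)
  (String.ofList r.1, r.2.1, r.2.2)

-- ===== PORT B =====
def replace_punction_alt (user_text : String) (exclamation_count : Int) (semicolon_count : Int) : String × Int × Int :=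
  let exclamation_count := exclamation_count + (PySem.Str.count user_text "!" : Int)
  let semicolon_count := semicolon_count + (PySem.Str.count user_text ";" : Int)
  let fixed_text := PySem.Str.replace (PySem.Str.replace user_text "!" ".") ";" ","
  (fixed_text, exclamation_count, semicolon_count)

-- ===== PRECONDITION & SPEC =====
def Spec_replace_punction (user_text : String) (exclamation_count : Int) (semicolon_count : Int) (out : String × Int × Int) : Prop := out = replace_punction_alt user_text exclamation_count semicolon_count
instance (user_text : String) (exclamation_count : Int) (semicolon_count : Int) (out : String × Int × Int) : Decidable (Spec_replace_punction user_text exclamation_count semicolon_count out) := by unfold Spec_replace_punction; infer_instance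

-- ===== CLAIM (what is proved, stated in full; the proofs are below) =====
def Claim_equal_replace_punction : Prop := ∀ (user_text : String) (exclamation_count : Int) (semicolon_count : Int), Dom_replace_punction user_text exclamation_count semicolon_count → Spec_replace_punction user_text exclamation_count semicolon_count (replace_punction user_text exclamation_count semicolon_count)

-- ===== LEMMAS AND PROOFS =====

-- Python's str.count scanner, specialised to a single-character needle, counts occurrences
theorem countgo_single (c : Char) (l : List Char) (fuel acc : Nat) (h : l.length ≤ fuel) :
    PySem.Chars.count.go [c] fuel l acc = acc + l.count c := by
  induction l generalizing fuel acc with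
  | nil => cases fuel <;> simp [PySem.Chars.count.go]
  | cons x t ih =>
    cases fuel with
    | zero => simp at h
    | succ n =>
      simp only [List.length_cons] at h
      have ht : t.length ≤ n := by omega
      simp only [PySem.Chars.count.go, List.isPrefixOf]
      by_cases hx : c = x
      · subst hx
        simp [ih n (acc + 1) ht]
        omega
      · simp [hx, ih n acc ht, Ne.symm hx]

theorem count_single (c : Char) (l : List Char) :
    PySem.Chars.count l [c] = l.count c := by
  simp [PySem.Chars.count, countgo_single c l l.length 0 le_rfl]

-- Python's str.replace scanner, specialised to single characters, is a map
theorem replacego_single (c d : Char) (l acc : List Char) (fuel : Nat) (h : l.length ≤ fuel) :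
    PySem.Chars.replace.go [c] [d] fuel l acc =
      acc.reverse ++ l.map (fun x => if x == c then d else x) := by
  induction l generalizing fuel acc with
  | nil => cases fuel <;> simp [PySem.Chars.replace.go]
  | cons x t ih =>
    cases fuel with
    | zero => simp at h
    | succ n =>
      simp only [List.length_cons] at h
      have ht : t.length ≤ n := by omega
      simp only [PySem.Chars.replace.go, List.isPrefixOf]
      by_cases hx : c = x
      · subst hx
        simp [ih (d :: acc) n ht]
      · simp [hx, ih (x :: acc) n ht, Ne.symm hx]

theorem replace_single (c d : Char) (l : List Char) :
    PySem.Chars.replace l [c] [d] = l.map (fun x => if x == c then d else x) := by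
  simp [PySem.Chars.replace, replacego_single c d l [] l.length le_rfl]

-- A's loop characterised: one map for the text, one count per counter
theorem loopA (l : List Char) (fx : List Char) (ec sc : Int) :
    l.foldl
      (fun (st : List Char × Int × Int) character =>
        if character == '!' then (st.1 ++ ['.'], st.2.1 + 1, st.2.2)
        else if character == ';' then (st.1 ++ [','], st.2.1, st.2.2 + 1)
        else (st.1 ++ [character], st.2.1, st.2.2))
      (fx, ec, sc)
    = (fx ++ l.map (fun x => if x == '!' then '.' else if x == ';' then ',' else x),
       ec + (l.count '!' : Int), sc + (l.count ';' : Int)) := by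
  induction l generalizing fx ec sc with
  | nil => simp
  | cons x t ih =>
    rw [List.foldl_cons]
    by_cases h1 : x = '!'
    · subst h1
      show List.foldl _ (fx ++ ['.'], ec + 1, sc) t = _
      rw [ih]
      simp [Prod.ext_iff]
      omega
    · by_cases h2 : x = ';'
      · subst h2
        show List.foldl _ (fx ++ [','], ec, sc + 1) t = _
        rw [ih]
        simp [Prod.ext_iff, h1]
        omega
      · have hb1 : (x == '!') = false := by simp [h1]
        have hb2 : (x == ';') = false := by simp [h2]
        show List.foldl _ (if (x == '!') = true then _ else if (x == ';') = true then _ else (fx ++ [x], ec, sc)) t = _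
        rw [hb1, hb2]
        simp only [Bool.false_eq_true, if_false]
        rw [ih]
        simp [Prod.ext_iff, h1, h2]

theorem main_eq (user_text : String) (ec sc : Int) :
    replace_punction user_text ec sc = replace_punction_alt user_text ec sc := by
  unfold replace_punction replace_punction_alt
  rw [loopA]
  have e1 : ("!" : String).toList = ['!'] := rfl
  have e2 : (";" : String).toList = [';'] := rfl
  simp only [PySem.Str.count_eq, e1, e2, count_single]
  refine Prod.ext ?_ rfl
  simp only [PySem.Str.replace, e1, e2,
    show ("." : String).toList = ['.'] from rfl, show ("," : String).toList = [','] from rfl,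
    replace_single, String.toList_ofList, List.map_map, List.nil_append]
  congr 1
  apply List.map_congr_left
  intro x _
  by_cases h1 : x = '!'
  · simp [h1]
  · by_cases h2 : x = ';'
    · simp [h1, h2]
    · simp [h1, h2]

-- ===== VERDICT (by name: the statement is the Claim_ definition above) =====
theorem replace_punction_spec : Claim_equal_replace_punction := by
  intro user_text ec sc _
  unfold Spec_replace_punction
  exact main_eq user_text ec sc
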